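-- pv_equiv track=rewrite | github.com/RobinJue/StartupEvalTool | table/table_generator.py | find_founding_year
-- ===== SOURCE A (Python) =====
-- def find_founding_year(data):
--     """
--     Finds the most common founding year from the JSON data.
--     If there is a tie for the most common founding year, the earliest year is used.
--
--     Args:
--         data (list): The JSON data as a list of dictionaries.
--
--     Returns:
--         int: The founding year of the company.
--     """
--     try:
--         # Extract all founding years from the JSON data
--         founding_years = []
--         for record in data:
--             for year_data in record.values():
--                 if "Year founded" in year_data and year_data["Year founded"]:
--                     founding_years.append(year_data["Year founded"])
--
--         if not founding_years:
--             raise ValueError("No founding year found in the JSON data.")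
--
--         # Count the frequency of each founding year
--         year_counts = {}
--         for year in founding_years:
--             year_counts[year] = year_counts.get(year, 0) + 1
--
--         # Find the most common founding year(s)
--         max_count = max(year_counts.values())
--         common_years = [year for year, count in year_counts.items() if count == max_count]
--
--         # If there's a tie, return the earliest year
--         return min(common_years)
--     except Exception as e:
--         raise ValueError(f"Error finding founding year: {e}")
-- ===== SOURCE B (Python) =====
-- def find_founding_year(data):
--     """
--     Finds the most common founding year from the JSON data.
--     If there is a tie for the most common founding year, the earliest year is used.
--     """
--     founding_years = [year_data["Year founded"]
--                       for record in data
--                       for year_data in record.values()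
--                       if "Year founded" in year_data and year_data["Year founded"]]
--     if not founding_years:
--         raise ValueError("Error finding founding year: No founding year found in the JSON data.")
--     # highest count wins, earliest year on a tie -- one direct selection, no counting dict
--     return min(founding_years, key=lambda y: (-founding_years.count(y), y))
-- ===== Notes on version B (the rewrite author's own statement) =====
-- stated objective: simpler
-- what changed: Replaces the frequency dict plus max-of-counts plus tie-filter plus min cascade by a single direct arg-min over the extracted years keyed by (-count, year), with the extraction itself a comprehension instead of nested append loops.
import Mathlib
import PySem

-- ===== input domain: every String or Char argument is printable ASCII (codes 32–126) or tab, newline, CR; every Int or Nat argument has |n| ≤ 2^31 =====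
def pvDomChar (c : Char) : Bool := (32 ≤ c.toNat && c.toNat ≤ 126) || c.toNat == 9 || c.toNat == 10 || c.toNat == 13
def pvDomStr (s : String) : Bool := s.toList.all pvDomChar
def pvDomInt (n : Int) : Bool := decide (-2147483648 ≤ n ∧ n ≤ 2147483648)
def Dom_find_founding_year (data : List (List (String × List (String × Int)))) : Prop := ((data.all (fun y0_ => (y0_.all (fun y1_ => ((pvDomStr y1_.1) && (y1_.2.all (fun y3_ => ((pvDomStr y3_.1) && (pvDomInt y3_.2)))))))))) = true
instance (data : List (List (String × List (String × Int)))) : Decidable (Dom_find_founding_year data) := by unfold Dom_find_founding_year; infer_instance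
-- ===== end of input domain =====

-- B: one direct arg-min over the extracted years keyed by (-count, year) replaces A's
-- frequency dict + max + tie-filter + min cascade; objective: simpler.


-- ===== PORT A =====
-- inner body of A's extraction loop: `if "Year founded" in year_data and year_data["Year founded"]: append`
def pvStepA (acc : List Int) (yd : List (String × Int)) : List Int :=
  match (PySem.Dict.mk yd).get? "Year founded" with
  | none => acc
  | some y => if y ≠ 0 then acc ++ [y] else acc

def find_founding_year (data : List (List (String × List (String × Int)))) : Int :=
  let founding_years := data.foldl (fun acc record => (record.map Prod.snd).foldl pvStepA acc) []
  let year_counts := founding_years.foldl (fun d y => d.insert y (d.getD y 0 + 1)) (PySem.Dict.empty : PySem.Dict Int Int)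
  let max_count := (PySem.List.max? year_counts.values (fun v => v)).getD 0
  let common_years := (year_counts.items.filter (fun p => p.2 == max_count)).map Prod.fst
  (PySem.List.min? common_years (fun y => y)).getD 0

-- ===== PORT B =====
-- B's comprehension filter: the year, if present under "Year founded" and truthy
def pvPickB (yd : List (String × Int)) : Option Int :=
  match (PySem.Dict.mk yd).get? "Year founded" with
  | none => none
  | some y => if y ≠ 0 then some y else none

def find_founding_year_alt (data : List (List (String × List (String × Int)))) : Int :=
  let founding_years := data.flatMap (fun record => (record.map Prod.snd).filterMap pvPickB)
  (PySem.List.min2? founding_years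
      (fun y => -(PySem.List.count founding_years y : Int)) (fun y => y)).getD 0

-- ===== PRECONDITION & SPEC =====
-- Pre_: some record has a value-dict whose first "Year founded" entry is non-zero; otherwise
-- the Python A (and B) raise ValueError ("No founding year found in the JSON data.").
def pvHasYear (yd : List (String × Int)) : Bool :=
  match yd.find? (fun q => q.1 == "Year founded") with
  | some q => q.2 != 0
  | none => false

def Pre_find_founding_year (data : List (List (String × List (String × Int)))) : Prop :=
  (data.any (fun record => record.any (fun p => pvHasYear p.2))) = true

instance (data : List (List (String × List (String × Int)))) : Decidable (Pre_find_founding_year data) := by unfold Pre_find_founding_year; infer_instance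

def pvWitness_find_founding_year : (List (List (String × List (String × Int)))) :=
  [[("company", [("Year founded", 2001)])]]

def Spec_find_founding_year (data : List (List (String × List (String × Int)))) (out : Int) : Prop := out = find_founding_year_alt data
instance (data : List (List (String × List (String × Int)))) (out : Int) : Decidable (Spec_find_founding_year data out) := by unfold Spec_find_founding_year; infer_instance

-- ===== CLAIM (what is proved, stated in full; the proofs are below) =====
def Claim_equal_find_founding_year : Prop := ∀ (data : List (List (String × List (String × Int)))), Dom_find_founding_year data → Pre_find_founding_year data → Spec_find_founding_year data (find_founding_year data)

-- ===== LEMMAS AND PROOFS =====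

-- Dict.mk lookup is first-match, i.e. List.find? on the key
theorem pv_get?_eq_find? (l : List (String × Int)) (k : String) :
    (PySem.Dict.mk l).get? k = (l.find? (fun q => q.1 == k)).map Prod.snd := by
  induction l with
  | nil => rfl
  | cons p rest ih =>
    rw [PySem.Dict.get?_mk_cons]
    by_cases h : (p.1 == k) = true
    · simp [List.find?, h]
    · simp [List.find?, h, ih]

-- A's inner extraction loop appends exactly B's filterMap picks
theorem pv_inner_eq (l : List (List (String × Int))) (acc : List Int) :
    l.foldl pvStepA acc = acc ++ l.filterMap pvPickB := by
  induction l generalizing acc with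
  | nil => simp
  | cons yd t ih =>
    simp only [List.foldl_cons, List.filterMap_cons, ih]
    unfold pvStepA pvPickB
    cases h : (PySem.Dict.mk yd).get? "Year founded" with
    | none => simp
    | some y => by_cases hy : y = 0 <;> simp [hy]

-- A's whole extraction equals B's comprehension
theorem pv_extract_eq (data : List (List (String × List (String × Int)))) :
    data.foldl (fun acc record => (record.map Prod.snd).foldl pvStepA acc) []
      = data.flatMap (fun record => (record.map Prod.snd).filterMap pvPickB) := by
  have hstep : (fun (acc : List Int) (record : List (String × List (String × Int))) =>
      (record.map Prod.snd).foldl pvStepA acc)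
      = fun acc record => acc ++ (record.map Prod.snd).filterMap pvPickB := by
    funext acc record; exact pv_inner_eq _ _
  rw [hstep]
  simpa using PySem.List.foldl_append_eq_flatMap
    (fun record => (record.map Prod.snd).filterMap pvPickB) data []

-- lexicographic order on the (k1, k2) key pair
def pvLex (p q : Int × Int) : Prop := p.1 < q.1 ∨ (p.1 = q.1 ∧ p.2 ≤ q.2)

theorem pv_lex_trans {p q r : Int × Int} (h1 : pvLex p q) (h2 : pvLex q r) : pvLex p r := by
  unfold pvLex at *; omega

-- the step function of min2?, named so the fold can be reasoned about
def pvStep2 (k1 k2 : Int → Int) (acc : Option Int) (x : Int) : Option Int :=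
  match acc with
  | none => some x
  | some w =>
    if (decide (k1 x < k1 w) || !decide (k1 w < k1 x) && decide (k2 x < k2 w)) = true
    then some x else some w

theorem pv_min2_eq (xs : List Int) (k1 k2 : Int → Int) :
    PySem.List.min2? xs k1 k2 = xs.foldl (pvStep2 k1 k2) none := by
  unfold PySem.List.min2?
  congr 1
  funext acc x
  cases acc <;> rfl

-- the fold behind min2?: its result is a member (or the seed) and lex-minimal
theorem pv_min2_fold (k1 k2 : Int → Int) (xs : List Int) (acc : Option Int) (m : Int)
    (h : xs.foldl (pvStep2 k1 k2) acc = some m) :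
    (acc = some m ∨ m ∈ xs) ∧
      ∀ y, (acc = some y ∨ y ∈ xs) → pvLex (k1 m, k2 m) (k1 y, k2 y) := by
  induction xs generalizing acc with
  | nil =>
    simp only [List.foldl_nil] at h
    refine ⟨Or.inl h, ?_⟩
    rintro y (hy | hy)
    · rw [h] at hy; cases hy; exact Or.inr ⟨rfl, le_refl _⟩
    · cases hy
  | cons x t ih =>
    simp only [List.foldl_cons] at h
    cases acc with
    | none =>
      rw [show pvStep2 k1 k2 none x = some x from rfl] at h
      obtain ⟨h1, h2⟩ := ih (some x) h
      refine ⟨?_, ?_⟩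
      · rcases h1 with h1 | h1
        · cases h1; exact Or.inr (List.mem_cons_self)
        · exact Or.inr (List.mem_cons_of_mem _ h1)
      · rintro y (hy | hy)
        · cases hy
        · rcases List.mem_cons.mp hy with rfl | hy
          · exact h2 y (Or.inl rfl)
          · exact h2 y (Or.inr hy)
    | some a =>
      by_cases hc : (decide (k1 x < k1 a) || !decide (k1 a < k1 x) && decide (k2 x < k2 a)) = true
      · rw [show pvStep2 k1 k2 (some a) x = some x by simp [pvStep2, hc]] at h
        obtain ⟨h1, h2⟩ := ih (some x) h
        have hxa : pvLex (k1 x, k2 x) (k1 a, k2 a) := by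
          simp only [Bool.or_eq_true, Bool.and_eq_true, Bool.not_eq_eq_eq_not, Bool.not_true,
            decide_eq_true_eq, decide_eq_false_iff_not] at hc
          unfold pvLex; simp only []; omega
        have hmx : pvLex (k1 m, k2 m) (k1 x, k2 x) := h2 x (Or.inl rfl)
        refine ⟨?_, ?_⟩
        · rcases h1 with h1 | h1
          · cases h1; exact Or.inr (List.mem_cons_self)
          · exact Or.inr (List.mem_cons_of_mem _ h1)
        · rintro y (hy | hy)
          · cases hy; exact pv_lex_trans hmx hxa
          · rcases List.mem_cons.mp hy with rfl | hy
            · exact hmx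
            · exact h2 y (Or.inr hy)
      · rw [show pvStep2 k1 k2 (some a) x = some a by simp [pvStep2, hc]] at h
        obtain ⟨h1, h2⟩ := ih (some a) h
        have hax : pvLex (k1 a, k2 a) (k1 x, k2 x) := by
          simp only [Bool.or_eq_true, Bool.and_eq_true, Bool.not_eq_eq_eq_not, Bool.not_true,
            decide_eq_true_eq, decide_eq_false_iff_not] at hc
          unfold pvLex; simp only []; omega
        have hma : pvLex (k1 m, k2 m) (k1 a, k2 a) := h2 a (Or.inl rfl)
        refine ⟨?_, ?_⟩
        · rcases h1 with h1 | h1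
          · exact Or.inl h1
          · exact Or.inr (List.mem_cons_of_mem _ h1)
        · rintro y (hy | hy)
          · cases hy; exact hma
          · rcases List.mem_cons.mp hy with rfl | hy
            · exact pv_lex_trans hma hax
            · exact h2 y (Or.inr hy)

-- min2? over a nonempty list is some
theorem pv_min2_isSome (xs : List Int) (k1 k2 : Int → Int) (hne : xs ≠ []) :
    ∃ m, PySem.List.min2? xs k1 k2 = some m := by
  rw [pv_min2_eq]
  obtain ⟨x, t, rfl⟩ := List.exists_cons_of_ne_nil hne
  have key : ∀ (t : List Int) (a : Int), ∃ m, t.foldl (pvStep2 k1 k2) (some a) = some m := by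
    intro t
    induction t with
    | nil => exact fun a => ⟨a, rfl⟩
    | cons z t ih =>
      intro a
      simp only [List.foldl_cons, pvStep2]
      split
      · exact ih z
      · exact ih a
  simpa using key t x

-- min2? picks a member that is lexicographically minimal under (k1, k2)
theorem pv_min2_spec (xs : List Int) (k1 k2 : Int → Int) (m : Int)
    (h : PySem.List.min2? xs k1 k2 = some m) :
    m ∈ xs ∧ ∀ y ∈ xs, k1 m < k1 y ∨ (k1 m = k1 y ∧ k2 m ≤ k2 y) := by
  rw [pv_min2_eq] at h
  obtain ⟨h1, h2⟩ := pv_min2_fold k1 k2 xs none m h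
  have hmem : m ∈ xs := by tauto
  refine ⟨hmem, fun y hy => ?_⟩
  have := h2 y (Or.inr hy)
  unfold pvLex at this
  simpa using this

-- pvPickB succeeds exactly on the dicts Pre_'s pvHasYear accepts
theorem pv_pick_hasYear (yd : List (String × Int)) :
    pvPickB yd ≠ none ↔ pvHasYear yd = true := by
  unfold pvPickB pvHasYear
  rw [pv_get?_eq_find?]
  cases h : yd.find? (fun q => q.1 == "Year founded") with
  | none => simp
  | some q =>
    by_cases hq : q.2 = 0 <;> simp [hq]

-- Pre_ says exactly that the extracted list is nonempty
theorem pv_pre_iff (data : List (List (String × List (String × Int)))) :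
    Pre_find_founding_year data ↔
      data.flatMap (fun record => (record.map Prod.snd).filterMap pvPickB) ≠ [] := by
  unfold Pre_find_founding_year
  rw [Ne, List.flatMap_eq_nil_iff]
  simp only [List.any_eq_true, List.filterMap_eq_nil_iff, List.mem_map]
  push Not
  constructor
  · rintro ⟨r, hr, p, hp, hy⟩
    exact ⟨r, hr, p.2, ⟨p, hp, rfl⟩, (pv_pick_hasYear p.2).mpr hy⟩
  · rintro ⟨r, hr, yd, ⟨p, hp, rfl⟩, hy⟩
    exact ⟨r, hr, p, hp, (pv_pick_hasYear p.2).mp hy⟩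

-- membership in A's common_years list, over the counter of the extracted years
theorem pv_mem_common (fy : List Int) (mc y : Int) :
    y ∈ (((PySem.Dict.counter fy).items.filter (fun p => p.2 == mc)).map Prod.fst)
      ↔ y ∈ PySem.Set.ofList fy ∧ ((List.count y fy : Int)) = mc := by
  rw [PySem.Dict.items_counter]
  constructor
  · rintro hm
    obtain ⟨p, hp, rfl⟩ := List.mem_map.mp hm
    obtain ⟨hp1, hp2⟩ := List.mem_filter.mp hp
    obtain ⟨k, hk, rfl⟩ := List.mem_map.mp hp1
    exact ⟨hk, by simpa using hp2⟩
  · rintro ⟨hk, hc⟩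
    refine List.mem_map.mpr ⟨(y, (List.count y fy : Int)), List.mem_filter.mpr ⟨List.mem_map.mpr ⟨y, hk, rfl⟩, by simpa using hc⟩, rfl⟩

-- ===== VERDICT (by name: the statement is the Claim_ definition above) =====
theorem find_founding_year_spec : Claim_equal_find_founding_year := by
  intro data _ hpre
  unfold Spec_find_founding_year find_founding_year find_founding_year_alt
  simp only [pv_extract_eq, PySem.Dict.foldl_insert_getD_add_one_eq_counter]
  set fy := data.flatMap (fun record => (record.map Prod.snd).filterMap pvPickB) with hfy
  have hne : fy ≠ [] := (pv_pre_iff data).mp hpre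
  -- B's side
  obtain ⟨b, hb⟩ := pv_min2_isSome fy
      (fun y => -(PySem.List.count fy y : Int)) (fun y => y) hne
  obtain ⟨hbmem, hbmin⟩ := pv_min2_spec fy _ _ b hb
  -- A's side: the maximal count
  have hvals : (PySem.Dict.counter fy).values
      = (PySem.Set.ofList fy).map (fun k => ((List.count k fy : Int))) := by
    show ((PySem.Dict.counter fy).items).map Prod.snd = _
    rw [PySem.Dict.items_counter, List.map_map]
    rfl
  have hsne : PySem.Set.ofList fy ≠ [] := by
    obtain ⟨x, t, hxt⟩ := List.exists_cons_of_ne_nil hne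
    intro h
    have hx : x ∈ PySem.Set.ofList fy :=
      (PySem.Set.mem_ofList fy x).mpr (hxt ▸ List.mem_cons_self)
    simp [h] at hx
  have hvne : (PySem.Dict.counter fy).values ≠ [] := by
    rw [hvals]; simpa using hsne
  obtain ⟨mc, hmc⟩ : ∃ mc, PySem.List.max? (PySem.Dict.counter fy).values (fun v => v) = some mc := by
    cases h : PySem.List.max? (PySem.Dict.counter fy).values (fun v => v) with
    | none => exact absurd ((PySem.List.max?_eq_none_iff _ _).mp h) hvne
    | some v => exact ⟨v, rfl⟩
  have hmax : ∀ k ∈ PySem.Set.ofList fy, ((List.count k fy : Int)) ≤ mc := by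
    intro k hk
    have := PySem.List.max?_isMax hmc ((List.count k fy : Int))
      (by rw [hvals]; exact List.mem_map.mpr ⟨k, hk, rfl⟩)
    simpa using this
  -- A's side: the earliest year among those of maximal count
  obtain ⟨k0, hk0, hk0c⟩ : ∃ k0 ∈ PySem.Set.ofList fy, ((List.count k0 fy : Int)) = mc := by
    have := PySem.List.max?_mem hmc
    rw [hvals] at this
    obtain ⟨k, hk, hkc⟩ := List.mem_map.mp this
    exact ⟨k, hk, hkc⟩
  have hcne : (((PySem.Dict.counter fy).items.filter (fun p => p.2 == mc)).map Prod.fst) ≠ [] := by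
    intro h
    have := (pv_mem_common fy mc k0).mpr ⟨hk0, hk0c⟩
    simp [h] at this
  obtain ⟨a, ha⟩ : ∃ a, PySem.List.min? (((PySem.Dict.counter fy).items.filter (fun p => p.2 == mc)).map Prod.fst) (fun y => y) = some a := by
    cases h : PySem.List.min? (((PySem.Dict.counter fy).items.filter (fun p => p.2 == mc)).map Prod.fst) (fun y => y) with
    | none => exact absurd ((PySem.List.min?_eq_none_iff _ _).mp h) hcne
    | some v => exact ⟨v, rfl⟩
  obtain ⟨hamem1, hamc⟩ := (pv_mem_common fy mc a).mp (PySem.List.min?_mem ha)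
  have hamin : ∀ y ∈ (((PySem.Dict.counter fy).items.filter (fun p => p.2 == mc)).map Prod.fst), a ≤ y :=
    fun y hy => PySem.List.min?_isMin ha y hy
  -- a = b
  have hafy : a ∈ fy := (PySem.Set.mem_ofList fy a).mp hamem1
  have hbset : b ∈ PySem.Set.ofList fy := (PySem.Set.mem_ofList fy b).mpr hbmem
  have hbd : ((List.count b fy : Int)) ≤ mc := hmax b hbset
  have hab : a = b := by
    rcases hbmin a hafy with hlt | ⟨heq, hle⟩
    · exfalso
      have : (PySem.List.count fy a : Int) < (PySem.List.count fy b : Int) := by omega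
      have hba : (List.count b fy : Int) ≤ (List.count a fy : Int) := hamc ▸ hbd
      unfold PySem.List.count at this
      omega
    · have hbc : ((List.count b fy : Int)) = mc := by
        unfold PySem.List.count at heq
        omega
      have : a ≤ b := hamin b ((pv_mem_common fy mc b).mpr ⟨hbset, hbc⟩)
      omega
  rw [hmc]
  simp only [Option.getD_some]
  rw [ha, hb, hab]
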